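-- pv_equiv track=rewrite | github.com/pengu-rengu/masonai | backend/masonai/src/fetch_social.py | _iter_event_lines
-- ===== SOURCE A (Python) =====
-- from collections.abc import Iterator
--
-- def _iter_event_lines(data: str) -> Iterator[list[str]]:
--     event_lines = []
--     is_event = False
--
--     for raw_line in data.splitlines():
--         line = raw_line.rstrip("\r")
--
--         if line == "BEGIN:VEVENT":
--             event_lines = []
--             is_event = True
--             continue
--
--         if line == "END:VEVENT":
--             if is_event:
--                 yield event_lines
--
--             event_lines = []
--             is_event = False
--             continue
--
--         if is_event:
--             event_lines.append(line)
-- ===== SOURCE B (Python) =====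
-- from collections.abc import Iterator
--
-- def _iter_event_lines(data: str) -> Iterator[list[str]]:
--     lines = [l.rstrip("\r") for l in data.splitlines()]
--     n = len(lines)
--     i = 0
--     while i < n:
--         if lines[i] != "BEGIN:VEVENT":
--             i += 1
--             continue
--         # found a block opener: consume until END:VEVENT
--         buf = []
--         i += 1
--         while i < n:
--             line = lines[i]
--             i += 1
--             if line == "END:VEVENT":
--                 yield buf
--                 break
--             if line == "BEGIN:VEVENT":
--                 buf = []
--             else:
--                 buf.append(line)
-- ===== Notes on version B (the rewrite author's own statement) =====
-- stated objective: alternative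
-- what changed: Replaces A's single flag-driven pass over the lines with an indexed outer scan that finds BEGIN:VEVENT and an inner consumer loop that accumulates the block until END:VEVENT (the in-event flag disappears).
import Mathlib
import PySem

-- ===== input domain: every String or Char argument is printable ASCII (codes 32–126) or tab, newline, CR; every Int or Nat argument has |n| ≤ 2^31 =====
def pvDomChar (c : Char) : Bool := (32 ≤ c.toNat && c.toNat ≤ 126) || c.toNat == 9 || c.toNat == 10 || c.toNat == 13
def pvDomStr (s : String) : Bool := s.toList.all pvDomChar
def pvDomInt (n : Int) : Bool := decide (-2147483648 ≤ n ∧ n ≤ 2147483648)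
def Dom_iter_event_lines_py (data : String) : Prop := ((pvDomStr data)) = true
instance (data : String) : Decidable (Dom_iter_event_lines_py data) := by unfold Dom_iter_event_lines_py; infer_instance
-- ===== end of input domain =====

-- B is an alternative decomposition: an outer finder / inner consumer over the normalised
-- line list instead of A's single flag-driven pass; same cost, different structure.

-- ===== PORT A =====
-- line.rstrip("\r"): drop trailing '\r' characters (exact Python semantics of rstrip with chars)
def pvRstripCR (s : String) : String :=
  String.ofList ((s.toList.reverse.dropWhile (fun c => c == '\r')).reverse)

-- the for-loop of A: state (event_lines, is_event); yields collected in order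
def pvGoA : List String → List String → Bool → List (List String)
  | [], _, _ => []
  | l :: rest, ev, flag =>
    if l == "BEGIN:VEVENT" then pvGoA rest [] true
    else if l == "END:VEVENT" then
      (if flag then [ev] else []) ++ pvGoA rest [] false
    else pvGoA rest (if flag then ev ++ [l] else ev) flag

def iter_event_lines_py (data : String) : List (List String) :=
  pvGoA ((PySem.Str.splitlines data).map pvRstripCR) [] false

-- ===== PORT B =====
-- outer while loop: advance until a BEGIN:VEVENT is found
-- inner while loop: accumulate buf until END:VEVENT (yield), resetting on a nested BEGIN
mutual
def pvOuterB : List String → List (List String)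
  | [] => []
  | l :: rest => if l == "BEGIN:VEVENT" then pvInnerB rest [] else pvOuterB rest

def pvInnerB : List String → List String → List (List String)
  | [], _ => []
  | l :: rest, buf =>
    if l == "END:VEVENT" then buf :: pvOuterB rest
    else if l == "BEGIN:VEVENT" then pvInnerB rest []
    else pvInnerB rest (buf ++ [l])
end

def iter_event_lines_py_alt (data : String) : List (List String) :=
  pvOuterB ((PySem.Str.splitlines data).map pvRstripCR)

-- ===== PRECONDITION & SPEC =====
def Spec_iter_event_lines_py (data : String) (out : List (List String)) : Prop := out = iter_event_lines_py_alt data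
instance (data : String) (out : List (List String)) : Decidable (Spec_iter_event_lines_py data out) := by unfold Spec_iter_event_lines_py; infer_instance

-- ===== CLAIM (what is proved, stated in full; the proofs are below) =====
def Claim_equal_iter_event_lines_py : Prop := ∀ (data : String), Dom_iter_event_lines_py data → Spec_iter_event_lines_py data (iter_event_lines_py data)

-- ===== LEMMAS AND PROOFS =====
theorem pvGoA_eq (ls : List String) :
    (∀ ev, pvGoA ls ev false = pvOuterB ls) ∧ (∀ buf, pvGoA ls buf true = pvInnerB ls buf) := by
  induction ls with
  | nil => exact ⟨fun _ => rfl, fun _ => rfl⟩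
  | cons l rest ih =>
    refine ⟨fun ev => ?_, fun buf => ?_⟩
    · show pvGoA (l :: rest) ev false = pvOuterB (l :: rest)
      rw [pvGoA, pvOuterB]
      by_cases hb : l == "BEGIN:VEVENT"
      · simp only [hb, if_true]; exact ih.2 []
      · simp only [hb, if_false]
        by_cases he : l == "END:VEVENT"
        · simp only [he, if_true, if_false, List.nil_append]; exact ih.1 []
        · simp only [he, if_false]; exact ih.1 ev
    · show pvGoA (l :: rest) buf true = pvInnerB (l :: rest) buf
      rw [pvGoA, pvInnerB]
      by_cases hb : l == "BEGIN:VEVENT"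
      · have he : (l == "END:VEVENT") = false := by
          simp_all
        simp only [hb, he, if_true, if_false]; exact ih.2 []
      · simp only [hb, if_false]
        by_cases he : l == "END:VEVENT"
        · have hb' : (l == "BEGIN:VEVENT") = false := by simp_all
          simp only [he, hb', if_true, if_false, List.singleton_append]
          rw [ih.1 []]
          simp
        · simp only [he, if_false, if_true]; exact ih.2 (buf ++ [l])

-- ===== VERDICT (by name: the statement is the Claim_ definition above) =====
theorem iter_event_lines_py_spec : Claim_equal_iter_event_lines_py := by
  intro data _
  unfold Spec_iter_event_lines_py iter_event_lines_py iter_event_lines_py_alt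
  exact (pvGoA_eq _).1 []
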